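-- pv_equiv track=rewrite | github.com/omegaestable/magma-ai | verify_structural_rules.py | right_depth
-- ===== SOURCE A (Python) =====
-- def right_depth(expr: str) -> int:
--     """Count closing parens after last letter, +1 if has *."""
--     expr = expr.strip()
--     if "*" not in expr:
--         return 0
--     count = 0
--     for ch in reversed(expr):
--         if ch == ")":
--             count += 1
--         elif ch.isalpha():
--             break
--     return count + 1
-- ===== SOURCE B (Python) =====
-- def right_depth(expr: str) -> int:
--     """Count closing parens after last letter, +1 if has *."""
--     expr = expr.strip()
--     if "*" not in expr:
--         return 0
--     last = max((i for i, ch in enumerate(expr) if ch.isalpha()), default=-1)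
--     return expr[last + 1:].count(")") + 1
-- ===== Notes on version B (the rewrite author's own statement) =====
-- stated objective: alternative
-- what changed: Replaced the reverse scan with break by a forward locate-last-letter (max over enumerate, default -1) followed by a library count of the closing parens in the suffix after that letter.
import Mathlib
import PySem

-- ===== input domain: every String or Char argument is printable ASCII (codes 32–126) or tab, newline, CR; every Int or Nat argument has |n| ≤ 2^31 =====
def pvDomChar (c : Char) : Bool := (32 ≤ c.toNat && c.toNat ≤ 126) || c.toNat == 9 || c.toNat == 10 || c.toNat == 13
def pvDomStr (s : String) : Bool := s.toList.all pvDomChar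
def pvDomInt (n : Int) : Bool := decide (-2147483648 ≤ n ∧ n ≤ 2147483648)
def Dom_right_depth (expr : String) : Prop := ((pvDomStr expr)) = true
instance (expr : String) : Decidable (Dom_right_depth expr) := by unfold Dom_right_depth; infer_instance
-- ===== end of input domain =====

-- B replaces A's reverse scan-with-break by locate-last-letter (max over enumerate) then a library count of ')' over the suffix; objective: alternative decomposition, same cost.

-- ===== PORT A =====
-- A's 'for ch in reversed(expr): …' loop with its running count and break
def rdGo (acc : Int) : List Char → Int
  | [] => acc
  | c :: r => if c = ')' then rdGo (acc + 1) r
              else if PySem.Chars.isalpha c then acc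
              else rdGo acc r

def right_depth (expr : String) : Int :=
  let e := PySem.Chars.strip expr.toList
  if ¬ PySem.Chars.isIn ['*'] e then 0
  else rdGo 0 e.reverse + 1

-- ===== PORT B =====
def right_depth_alt (expr : String) : Int :=
  let e := PySem.Chars.strip expr.toList
  if ¬ PySem.Chars.isIn ['*'] e then 0
  else
    let last : Int :=
      PySem.List.maxD (((PySem.List.enumerate e).filter (fun p => PySem.Chars.isalpha p.2)).map (fun p => p.1)) (fun i => i) (-1)
    ((PySem.Chars.count (PySem.List.slice e (some (last + 1)) none) [')'] : Int)) + 1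

-- ===== PRECONDITION & SPEC =====
def Spec_right_depth (expr : String) (out : Int) : Prop := out = right_depth_alt expr
instance (expr : String) (out : Int) : Decidable (Spec_right_depth expr out) := by unfold Spec_right_depth; infer_instance

-- ===== CLAIM (what is proved, stated in full; the proofs are below) =====
def Claim_equal_right_depth : Prop := ∀ (expr : String), Dom_right_depth expr → Spec_right_depth expr (right_depth expr)

-- ===== LEMMAS AND PROOFS =====

-- index list of the alphabetic positions of l, as B computes it
def alphaIdx (l : List Char) : List Int :=
  ((PySem.List.enumerate l).filter (fun p => PySem.Chars.isalpha p.2)).map (fun p => p.1)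

def lastIdx (l : List Char) : Int :=
  PySem.List.maxD (alphaIdx l) (fun i => i) (-1)

lemma count_go_single (c : Char) :
    ∀ (s : List Char) (fuel acc : Nat), s.length ≤ fuel →
      PySem.Chars.count.go [c] fuel s acc = acc + s.count c := by
  intro s
  induction s with
  | nil => intro fuel acc _; cases fuel <;> simp [PySem.Chars.count.go]
  | cons h t ih =>
      intro fuel acc hf
      cases fuel with
      | zero => simp at hf
      | succ n =>
          simp only [List.length_cons] at hf
          by_cases hc : c = h
          · subst hc
            simp [PySem.Chars.count.go, List.isPrefixOf, ih n (acc + 1) (by omega)]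
            omega
          · simp [PySem.Chars.count.go, List.isPrefixOf, hc,
              ih n acc (by omega), Ne.symm hc]

lemma chars_count_single (c : Char) (s : List Char) :
    PySem.Chars.count s [c] = s.count c := by
  simp [PySem.Chars.count, count_go_single c s s.length 0 (le_refl _)]

lemma rdGo_acc (l : List Char) : ∀ acc : Int, rdGo acc l = acc + rdGo 0 l := by
  induction l with
  | nil => intro acc; simp [rdGo]
  | cons c r ih =>
      intro acc
      by_cases hc : c = ')'
      · simp [rdGo, hc, ih (acc + 1), ih 1]; ring
      · by_cases ha : PySem.Chars.isalpha c
        · simp [rdGo, hc, ha]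
        · simp [rdGo, hc, ha, ih acc]

lemma alphaIdx_lt (l : List Char) : ∀ i ∈ alphaIdx l, i < (l.length : Int) := by
  intro i hi
  simp only [alphaIdx, List.mem_map, List.mem_filter] at hi
  obtain ⟨p, ⟨hp, _⟩, rfl⟩ := hi
  rw [PySem.List.mem_enumerate_iff] at hp
  obtain ⟨k, hk, rfl⟩ := hp
  simp; omega

lemma maxD_append_big (xs : List Int) (m d : Int) (h : ∀ x ∈ xs, x < m) :
    PySem.List.maxD (xs ++ [m]) (fun i => i) d = m := by
  cases xs with
  | nil => simp [PySem.List.maxD_id_cons]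
  | cons x t =>
      have hmem : PySem.List.maxD (x :: t) (fun i => i) d ∈ x :: t :=
        PySem.List.maxD_mem _ _ _ (by simp)
      rw [show (x :: t) ++ [m] = x :: (t ++ [m]) by simp,
        PySem.List.maxD_id_cons, List.foldl_append]
      rw [PySem.List.maxD_id_cons] at hmem
      have hlt : List.foldl max x t < m := h _ hmem
      simp [max_eq_right (le_of_lt hlt)]

lemma alphaIdx_append (l : List Char) (c : Char) :
    alphaIdx (l ++ [c]) =
      alphaIdx l ++ (if PySem.Chars.isalpha c then [(l.length : Int)] else []) := by
  simp only [alphaIdx, PySem.List.enumerate_append, List.filter_append, List.map_append]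
  by_cases ha : PySem.Chars.isalpha c <;>
    simp [PySem.List.enumerate, ha]

lemma alphaIdx_nonneg (l : List Char) : ∀ i ∈ alphaIdx l, 0 ≤ i := by
  intro i hi
  simp only [alphaIdx, List.mem_map, List.mem_filter] at hi
  obtain ⟨p, ⟨hp, _⟩, rfl⟩ := hi
  rw [PySem.List.mem_enumerate_iff] at hp
  obtain ⟨k, hk, rfl⟩ := hp
  simp

lemma lastIdx_bounds (l : List Char) : -1 ≤ lastIdx l ∧ lastIdx l < (l.length : Int) := by
  by_cases h : alphaIdx l = []
  · simp [lastIdx, h]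
    omega
  · have hmem : lastIdx l ∈ alphaIdx l := PySem.List.maxD_mem _ _ _ h
    exact ⟨by have := alphaIdx_nonneg l _ hmem; omega, alphaIdx_lt l _ hmem⟩

-- the heart: A's reverse loop equals the ')'-count of the suffix after the last letter
lemma main_lemma (l : List Char) :
    rdGo 0 l.reverse = ((PySem.List.slice l (some (lastIdx l + 1)) none).count ')' : Int) := by
  induction l using List.reverseRecOn with
  | nil => simp [rdGo, lastIdx, alphaIdx, PySem.List.enumerate, PySem.List.maxD_nil,
      PySem.List.slice]
  | append_singleton l c ih =>
      rw [List.reverse_append]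
      simp only [List.reverse_singleton, List.singleton_append]
      by_cases ha : PySem.Chars.isalpha c
      · have hc : c ≠ ')' := by
          intro h; subst h; revert ha; decide
        have hlast : lastIdx (l ++ [c]) = (l.length : Int) := by
          unfold lastIdx
          rw [alphaIdx_append, if_pos ha]
          exact maxD_append_big _ _ _ (alphaIdx_lt l)
        have hsl : PySem.List.slice (l ++ [c]) (some ((l.length : Int) + 1)) none = [] := by
          rw [PySem.List.slice_from _ (by positivity)]
          apply List.drop_eq_nil_of_le
          simp
        simp [rdGo, hc, ha, hlast, hsl]
      · have hlast : lastIdx (l ++ [c]) = lastIdx l := by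
          unfold lastIdx
          rw [alphaIdx_append, if_neg ha]
          simp
        obtain ⟨hlb, hub⟩ := lastIdx_bounds l
        have h0 : (0 : Int) ≤ lastIdx l + 1 := by omega
        have hle : (lastIdx l + 1).toNat ≤ l.length := by omega
        rw [hlast, PySem.List.slice_from _ h0,
          List.drop_append_of_le_length hle, List.count_append,
          List.count_singleton']
        rw [PySem.List.slice_from _ h0] at ih
        by_cases hc : c = ')'
        · subst hc
          have h1 : rdGo 0 (')' :: l.reverse) = rdGo 1 l.reverse := by
            simp [rdGo]
          rw [h1, rdGo_acc, ih]
          simp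
          omega
        · have h1 : rdGo 0 (c :: l.reverse) = rdGo 0 l.reverse := by
            simp [rdGo, hc, ha]
          rw [h1, ih]
          simp [hc]

-- ===== VERDICT (by name: the statement is the Claim_ definition above) =====
theorem right_depth_spec : Claim_equal_right_depth := by
  intro expr _
  unfold Spec_right_depth right_depth right_depth_alt
  simp only []
  set e := PySem.Chars.strip expr.toList with he
  by_cases hstar : PySem.Chars.isIn ['*'] e
  · simp [hstar, main_lemma e, lastIdx, alphaIdx, chars_count_single]
  · simp [hstar]
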